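-- pv_equiv track=rewrite | github.com/Snackhole/SnakeNotes | Source/Core/ZimWikiConverters.py | ConvertFromZimWikiSyntax
-- ===== SOURCE A (Python) =====
-- def ConvertFromZimWikiSyntax(TextToConvert):
--     TextToConvert = TextToConvert.replace("//", "*")
--     TextToConvert = TextToConvert.replace("__", "")
--     TextToConvert = TextToConvert.replace("'''", "```")
--     TextToConvert = TextToConvert.replace("''", "`")
--     TextToConvert = TextToConvert.replace("{{", "![](")
--     TextToConvert = TextToConvert.replace("}}", ")")
--     TextToConvert = TextToConvert.replace("[[", "")
--     TextToConvert = TextToConvert.replace("]]", "")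
--     TextToConvert = TextToConvert.replace("====== ", "# ")
--     TextToConvert = TextToConvert.replace("===== ", "## ")
--     TextToConvert = TextToConvert.replace("==== ", "### ")
--     TextToConvert = TextToConvert.replace("=== ", "#### ")
--     TextToConvert = TextToConvert.replace("== ", "##### ")
--     TextToConvert = TextToConvert.replace("= ", "###### ")
--     TextToConvert = TextToConvert.replace(" ======", "")
--     TextToConvert = TextToConvert.replace(" =====", "")
--     TextToConvert = TextToConvert.replace(" ====", "")
--     TextToConvert = TextToConvert.replace(" ===", "")
--     TextToConvert = TextToConvert.replace(" ==", "")
--     TextToConvert = TextToConvert.replace(" =", "")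
--     Lines = TextToConvert.splitlines()
--     HorizontalRuleCharacterSet = set("-")
--     SkipLines = False
--     for Index in range(len(Lines)):
--         if Lines[Index] == "```":
--             SkipLines = not SkipLines
--         if not SkipLines:
--             LineCharacterSet = set(Lines[Index])
--             if LineCharacterSet.issubset(HorizontalRuleCharacterSet) and len(Lines[Index]) > 4:
--                 Lines[Index] = "***"
--     SkipLines = False
--     for Index in range(len(Lines)):
--         NextIndex = Index + 1
--         if NextIndex < len(Lines):
--             NextLine = Lines[NextIndex]
--             if Lines[Index] == "```":
--                 SkipLines = not SkipLines
--             if NextLine != "" and Lines[Index] != "" and Lines[Index] != "***" and not Lines[Index].startswith(("* ", "#", "```")) and not Lines[Index].split(".")[0].isnumeric() and not SkipLines: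
--                 Lines[Index] += "  "
--     TextToConvert = "\n".join(Lines).rstrip().lstrip()
--     return TextToConvert
-- ===== SOURCE B (Python) =====
-- def _split_segments(lines):
--     # Recursively split the line list at "```" fence lines into alternating
--     # text/code segments (the fences themselves are dropped; always >= 1 segment).
--     if not lines:
--         return [[]]
--     head, rest = lines[0], lines[1:]
--     if head == "```":
--         return [[]] + _split_segments(rest)
--     segments = _split_segments(rest)
--     return [[head] + segments[0]] + segments[1:]
--
--
-- def _text_segment(seg, has_next):
--     # Inside a text segment: dash-runs become horizontal rules, then a Markdown
--     # line break is appended to every line followed by a non-empty line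
--     # (the line after the segment, if any, is the non-empty fence "```").
--     conv = ["***" if len(l) > 4 and set(l) <= {"-"} else l for l in seg]
--     out = []
--     for j, l in enumerate(conv):
--         nxt = conv[j + 1] if j + 1 < len(conv) else ("```" if has_next else "")
--         if (nxt != "" and l != "" and l != "***"
--                 and not l.startswith(("* ", "#", "```"))
--                 and not l.split(".")[0].isnumeric()):
--             l += "  "
--         out.append(l)
--     return out
--
--
-- def _process(segments, inside):
--     # Alternate over segments: code segments pass through verbatim, text
--     # segments are converted; reassemble with the "```" fences between them.
--     seg, rest = segments[0], segments[1:]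
--     out = list(seg) if inside else _text_segment(seg, bool(rest))
--     if not rest:
--         return out
--     return out + ["```"] + _process(rest, not inside)
--
--
-- def ConvertFromZimWikiSyntax(TextToConvert):
--     for Old, New in [("//", "*"), ("__", ""), ("'''", "```"), ("''", "`"),
--                      ("{{", "![]("), ("}}", ")"), ("[[", ""), ("]]", ""),
--                      ("====== ", "# "), ("===== ", "## "), ("==== ", "### "),
--                      ("=== ", "#### "), ("== ", "##### "), ("= ", "###### "),
--                      (" ======", ""), (" =====", ""), (" ====", ""),
--                      (" ===", ""), (" ==", ""), (" =", "")]: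
--         TextToConvert = TextToConvert.replace(Old, New)
--     segments = _split_segments(TextToConvert.splitlines())
--     return "\n".join(_process(segments, False)).strip()
-- ===== Notes on version B (the rewrite author's own statement) =====
-- stated objective: alternative
-- what changed: Instead of A's two index loops over the whole line array each re-tracking a code-block flag, B recursively splits the document at ``` fence lines into alternating text/code segments, converts only the text segments (rule mapping plus per-segment break pass, with the following fence standing in as the next line), and reassembles the segments around the fences.
import Mathlib
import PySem

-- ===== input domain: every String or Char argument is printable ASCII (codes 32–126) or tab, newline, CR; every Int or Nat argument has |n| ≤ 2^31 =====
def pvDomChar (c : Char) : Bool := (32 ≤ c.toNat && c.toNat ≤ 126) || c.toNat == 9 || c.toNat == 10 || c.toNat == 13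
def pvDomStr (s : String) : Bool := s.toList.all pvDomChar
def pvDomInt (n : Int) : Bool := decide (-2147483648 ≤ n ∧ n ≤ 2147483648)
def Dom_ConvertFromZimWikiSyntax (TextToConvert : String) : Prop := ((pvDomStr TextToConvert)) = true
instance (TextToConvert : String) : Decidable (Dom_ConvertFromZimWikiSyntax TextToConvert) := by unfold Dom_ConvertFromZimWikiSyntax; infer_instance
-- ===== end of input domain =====

-- B replaces A's two flag-carrying index loops over the line array by a recursive split of the
-- document at ``` fences into alternating text/code segments, converting only the text segments
-- and reassembling around the fences (objective: alternative decomposition, same cost).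


-- ===== PORT A =====
-- set(Lines[Index]).issubset(set("-")) and len(Lines[Index]) > 4
def pvA_isRule (l : String) : Bool :=
  PySem.Set.issubset (PySem.Set.ofList l.toList) (PySem.Set.ofList "-".toList)
    && decide ((4 : Int) < PySem.Str.len l)

-- the big 'and' condition of A's second loop (in Python's order); .isnumeric() ported as
-- strIsdigit (exact on the printable-ASCII domain); split(".")[0] via split? with the non-empty
-- literal separator ".", so the getD/headD defaults are never taken
def pvA_breakCond (l next : String) (skip : Bool) : Bool :=
  (!(next == "")) && (!(l == "")) && (!(l == "***"))
    && (!(PySem.Str.startswith l "* " || PySem.Str.startswith l "#" || PySem.Str.startswith l "```"))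
    && (!(PySem.Str.strIsdigit (((PySem.Str.split? l ".").getD []).headD "")))
    && (!skip)

-- A's first index loop (horizontal rules): at index i only Lines[i] is read and written, so the
-- index loop with in-place mutation is exactly this structural recursion carrying SkipLines
def pvA_dashLoop : Bool → List String → List String
  | _, [] => []
  | skip, l :: rest =>
    let skip' := if l == "```" then !skip else skip
    let l' := if !skip' && pvA_isRule l then "***" else l
    l' :: pvA_dashLoop skip' rest

-- A's second index loop (line breaks): the body runs only when NextIndex < len(Lines); at index i
-- it reads Lines[i] and the not-yet-modified Lines[i+1] and writes Lines[i], so it is this recursion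
def pvA_breakLoop : Bool → List String → List String
  | _, [] => []
  | _, [l] => [l]
  | skip, l :: next :: rest =>
    let skip' := if l == "```" then !skip else skip
    (if pvA_breakCond l next skip' then l ++ "  " else l) :: pvA_breakLoop skip' (next :: rest)

def ConvertFromZimWikiSyntax (TextToConvert : String) : String :=
  let t0 := PySem.Str.replace TextToConvert "//" "*"
  let t1 := PySem.Str.replace t0 "__" ""
  let t2 := PySem.Str.replace t1 "'''" "```"
  let t3 := PySem.Str.replace t2 "''" "`"
  let t4 := PySem.Str.replace t3 "{{" "![]("
  let t5 := PySem.Str.replace t4 "}}" ")"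
  let t6 := PySem.Str.replace t5 "[[" ""
  let t7 := PySem.Str.replace t6 "]]" ""
  let t8 := PySem.Str.replace t7 "====== " "# "
  let t9 := PySem.Str.replace t8 "===== " "## "
  let t10 := PySem.Str.replace t9 "==== " "### "
  let t11 := PySem.Str.replace t10 "=== " "#### "
  let t12 := PySem.Str.replace t11 "== " "##### "
  let t13 := PySem.Str.replace t12 "= " "###### "
  let t14 := PySem.Str.replace t13 " ======" ""
  let t15 := PySem.Str.replace t14 " =====" ""
  let t16 := PySem.Str.replace t15 " ====" ""
  let t17 := PySem.Str.replace t16 " ===" ""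
  let t18 := PySem.Str.replace t17 " ==" ""
  let t19 := PySem.Str.replace t18 " =" ""
  let lines := PySem.Str.splitlines t19
  let lines := pvA_dashLoop false lines
  let lines := pvA_breakLoop false lines
  PySem.Str.lstrip (PySem.Str.rstrip (PySem.Str.join "\n" lines))

-- ===== PORT B =====
-- _split_segments: recursive split of the line list at "```" fence lines (always nonempty result)
def pvB_split : List String → List (List String)
  | [] => [[]]
  | head :: rest =>
    if head == "```" then [] :: pvB_split rest
    else match pvB_split rest with
      | [] => [[head]]   -- unreachable: _split_segments always returns a nonempty list
      | s0 :: ss => (head :: s0) :: ss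

-- "***" if len(l) > 4 and set(l) <= {"-"} else l
def pvB_conv (l : String) : String :=
  if decide ((4 : Int) < PySem.Str.len l)
      && PySem.Set.issubset (PySem.Set.ofList l.toList) (PySem.Set.ofList "-".toList)
    then "***" else l

-- the break test of _text_segment (nxt already substituted; same .isnumeric() porting as in A)
def pvB_cond (l nxt : String) : Bool :=
  (!(nxt == "")) && (!(l == "")) && (!(l == "***"))
    && (!(PySem.Str.startswith l "* " || PySem.Str.startswith l "#" || PySem.Str.startswith l "```"))
    && (!(PySem.Str.strIsdigit (((PySem.Str.split? l ".").getD []).headD "")))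

-- the enumerate loop of _text_segment over the converted lines: nxt is the next converted line,
-- or "```"/"" (has_next) past the end
def pvB_breaks (hasNext : Bool) : List String → List String
  | [] => []
  | [l] => [if pvB_cond l (if hasNext then "```" else "") then l ++ "  " else l]
  | l :: next :: rest =>
    (if pvB_cond l next then l ++ "  " else l) :: pvB_breaks hasNext (next :: rest)

-- _process: alternate over segments, fences reinserted between them
def pvB_process : List (List String) → Bool → List String
  | [], _ => []   -- unreachable: _process is only applied to _split_segments' nonempty result
  | [seg], inside => if inside then seg else pvB_breaks false (seg.map pvB_conv)
  | seg :: s1 :: rest, inside =>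
    (if inside then seg else pvB_breaks true (seg.map pvB_conv))
      ++ "```" :: pvB_process (s1 :: rest) (!inside)

def ConvertFromZimWikiSyntax_alt (TextToConvert : String) : String :=
  let t := [("//", "*"), ("__", ""), ("'''", "```"), ("''", "`"),
            ("{{", "![]("), ("}}", ")"), ("[[", ""), ("]]", ""),
            ("====== ", "# "), ("===== ", "## "), ("==== ", "### "),
            ("=== ", "#### "), ("== ", "##### "), ("= ", "###### "),
            (" ======", ""), (" =====", ""), (" ====", ""),
            (" ===", ""), (" ==", ""), (" =", "")].foldl
        (fun acc p => PySem.Str.replace acc p.1 p.2) TextToConvert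
  PySem.Str.strip (PySem.Str.join "\n" (pvB_process (pvB_split (PySem.Str.splitlines t)) false))

-- ===== PRECONDITION & SPEC =====
def Spec_ConvertFromZimWikiSyntax (TextToConvert : String) (out : String) : Prop := out = ConvertFromZimWikiSyntax_alt TextToConvert
instance (TextToConvert : String) (out : String) : Decidable (Spec_ConvertFromZimWikiSyntax TextToConvert out) := by unfold Spec_ConvertFromZimWikiSyntax; infer_instance

-- ===== CLAIM (what is proved, stated in full; the proofs are below) =====
def Claim_equal_ConvertFromZimWikiSyntax : Prop := ∀ (TextToConvert : String), Dom_ConvertFromZimWikiSyntax TextToConvert → Spec_ConvertFromZimWikiSyntax TextToConvert (ConvertFromZimWikiSyntax TextToConvert)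

-- ===== LEMMAS AND PROOFS =====

-- the fused single pass over the lines, intermediate between A's two loops and B's segments
def pvGo : Bool → List String → List String
  | _, [] => []
  | skip, l :: rest =>
    let skip' := if l == "```" then !skip else skip
    let l' := if !skip' && pvA_isRule l then "***" else l
    let l'' := match rest with
      | [] => l'
      | next :: _ => if pvA_breakCond l' next skip' then l' ++ "  " else l'
    l'' :: pvGo skip' rest

theorem pv_rule_tick : pvA_isRule "```" = false := by decide

theorem pv_rule_empty : pvA_isRule "" = false := by decide

theorem pv_conv_tick (s : Bool) (l : String) :
    ((if !s && pvA_isRule l then "***" else l) == "```") = (l == "```") := by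
  by_cases h : (!s && pvA_isRule l) = true
  · rw [if_pos h]
    have hr : pvA_isRule l = true := ((Bool.and_eq_true _ _).mp h).2
    have hne : l ≠ "```" := by intro he; rw [he, pv_rule_tick] at hr; cases hr
    rw [beq_eq_false_iff_ne.mpr hne, show (("***" : String) == "```") = false from by decide]
  · rw [if_neg h]

theorem pv_conv_empty (s : Bool) (l : String) :
    ((if !s && pvA_isRule l then "***" else l) == "") = (l == "") := by
  by_cases h : (!s && pvA_isRule l) = true
  · rw [if_pos h]
    have hr : pvA_isRule l = true := ((Bool.and_eq_true _ _).mp h).2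
    have hne : l ≠ "" := by intro he; rw [he, pv_rule_empty] at hr; cases hr
    rw [beq_eq_false_iff_ne.mpr hne, show (("***" : String) == "") = false from by decide]
  · rw [if_neg h]

theorem pv_breakCond_eq (l : String) (s'' : Bool) (y : String) (skip : Bool) :
    pvA_breakCond l (if !s'' && pvA_isRule y then "***" else y) skip = pvA_breakCond l y skip := by
  unfold pvA_breakCond
  rw [pv_conv_empty]

-- A's two index loops fuse into the single pass pvGo
theorem pv_merge (xs : List String) : ∀ (s : Bool),
    pvA_breakLoop s (pvA_dashLoop s xs) = pvGo s xs := by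
  induction xs with
  | nil => intro s; rfl
  | cons x rest ih =>
    intro s
    cases rest with
    | nil =>
      show pvA_breakLoop s [if !(if x == "```" then !s else s) && pvA_isRule x then "***" else x]
          = pvGo s [x]
      simp only [pvA_breakLoop, pvGo]
    | cons y rest' =>
      have hd : pvA_dashLoop s (x :: y :: rest') =
          (if !(if x == "```" then !s else s) && pvA_isRule x then "***" else x) ::
          (if !(if y == "```" then !(if x == "```" then !s else s) else (if x == "```" then !s else s))
              && pvA_isRule y then "***" else y) ::
          pvA_dashLoop (if y == "```" then !(if x == "```" then !s else s) else (if x == "```" then !s else s)) rest' := rfl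
      rw [hd]
      show (if pvA_breakCond _ _ (if (if !(if x == "```" then !s else s) && pvA_isRule x then "***" else x) == "```" then !s else s)
              then (if !(if x == "```" then !s else s) && pvA_isRule x then "***" else x) ++ "  "
              else (if !(if x == "```" then !s else s) && pvA_isRule x then "***" else x)) ::
            pvA_breakLoop (if (if !(if x == "```" then !s else s) && pvA_isRule x then "***" else x) == "```" then !s else s) _
          = pvGo s (x :: y :: rest')
      rw [pv_conv_tick, pv_breakCond_eq]
      have hfold : (if !(if y == "```" then !(if x == "```" then !s else s) else (if x == "```" then !s else s))
              && pvA_isRule y then "***" else y) ::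
          pvA_dashLoop (if y == "```" then !(if x == "```" then !s else s) else (if x == "```" then !s else s)) rest'
          = pvA_dashLoop (if x == "```" then !s else s) (y :: rest') := rfl
      rw [hfold, ih]
      simp only [pvGo]

-- bridges between A's primitives and B's
theorem pv_conv_eq (s : Bool) (l : String) (h : s = false) :
    (if !s && pvA_isRule l then "***" else l) = pvB_conv l := by
  subst h
  unfold pvA_isRule pvB_conv
  rw [Bool.not_false, Bool.true_and, Bool.and_comm]

theorem pv_cond_eq (l n : String) : pvA_breakCond l n false = pvB_cond l n := by
  unfold pvA_breakCond pvB_cond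
  rw [Bool.not_false, Bool.and_true]

theorem pv_cond_skip (l n : String) : pvA_breakCond l n true = false := by
  unfold pvA_breakCond
  rw [Bool.not_true, Bool.and_false]

-- only the emptiness of nxt matters, and pvB_conv preserves emptiness
theorem pv_conv_empty' (x : String) : (pvB_conv x == "") = (x == "") := by
  have := pv_conv_empty false x
  rwa [pv_conv_eq false x rfl] at this

theorem pv_cond_conv (l x : String) : pvB_cond l (pvB_conv x) = pvB_cond l x := by
  unfold pvB_cond
  rw [pv_conv_empty']

theorem pv_cond_tickline (n : String) (b : Bool) : pvA_breakCond "```" n b = false := by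
  unfold pvA_breakCond
  rw [show (PySem.Str.startswith "```" "* " || PySem.Str.startswith "```" "#"
        || PySem.Str.startswith "```" "```") = true from by decide]
  simp

theorem pv_split_ne_nil (ls : List String) : pvB_split ls ≠ [] := by
  cases ls with
  | nil => simp [pvB_split]
  | cons h t =>
    unfold pvB_split
    by_cases hh : (h == "```") = true
    · simp [hh]
    · rw [if_neg hh]
      cases pvB_split t <;> simp

-- shape lemmas for the single pass
theorem pvGo_tick (s : Bool) (rest : List String) :
    pvGo s ("```" :: rest) = "```" :: pvGo (!s) rest := by
  unfold pvGo
  simp only [show (("```" : String) == "```") = true from rfl, if_true, pv_rule_tick,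
    Bool.and_false, Bool.false_eq_true, if_false]
  cases rest with
  | nil => rfl
  | cons y ys => simp [pv_cond_tickline, pvGo]

theorem pvGo_inside (l : String) (rest : List String) (hl : (l == "```") = false) :
    pvGo true (l :: rest) = l :: pvGo true rest := by
  unfold pvGo
  rw [if_neg (by simp [hl])]
  simp only [Bool.not_true, Bool.false_and, Bool.false_eq_true, if_false]
  cases rest with
  | nil => rfl
  | cons y ys => simp [pv_cond_skip, pvGo]

theorem pvGo_text_nil (l : String) (hl : (l == "```") = false) :
    pvGo false [l] = [pvB_conv l] := by
  unfold pvGo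
  rw [if_neg (by simp [hl])]
  simp only []
  rw [pv_conv_eq false l rfl]
  rfl

theorem pvGo_text_cons (l x : String) (rs : List String) (hl : (l == "```") = false) :
    pvGo false (l :: x :: rs)
      = (if pvB_cond (pvB_conv l) x then pvB_conv l ++ "  " else pvB_conv l)
          :: pvGo false (x :: rs) := by
  unfold pvGo
  rw [if_neg (by simp [hl])]
  simp only []
  rw [pv_conv_eq false l rfl, pv_cond_eq]
  simp [pvGo]

-- the single pass equals B's split-process pipeline, for any starting flag
theorem pv_seg : ∀ (ls : List String) (s : Bool),
    pvGo s ls = pvB_process (pvB_split ls) s := by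
  intro ls
  induction ls with
  | nil =>
    intro s
    show ([] : List String) = pvB_process [[]] s
    cases s <;> rfl
  | cons l rest ih =>
    intro s
    by_cases hl : (l == "```") = true
    · -- fence line: passes through unchanged, flag toggles
      have hleq : l = "```" := eq_of_beq hl
      subst hleq
      have hsplit : pvB_split ("```" :: rest) = [] :: pvB_split rest := by
        simp [pvB_split]
      obtain ⟨s0, ss, hs⟩ : ∃ s0 ss, pvB_split rest = s0 :: ss := by
        cases h : pvB_split rest with
        | nil => exact absurd h (pv_split_ne_nil rest)
        | cons a b => exact ⟨a, b, rfl⟩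
      rw [hsplit, hs, pvGo_tick, ih (!s), hs]
      show "```" :: pvB_process (s0 :: ss) (!s) = pvB_process ([] :: s0 :: ss) s
      cases s <;> simp [pvB_process, pvB_breaks]
    · -- ordinary line
      have hl' : (l == "```") = false := by simpa using hl
      obtain ⟨s0, ss, hs⟩ : ∃ s0 ss, pvB_split rest = s0 :: ss := by
        cases h : pvB_split rest with
        | nil => exact absurd h (pv_split_ne_nil rest)
        | cons a b => exact ⟨a, b, rfl⟩
      have hsplit : pvB_split (l :: rest) = (l :: s0) :: ss := by
        unfold pvB_split; rw [if_neg (by simp [hl']), hs]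
      rw [hsplit]
      cases s with
      | true =>
        rw [pvGo_inside l rest hl', ih true, hs]
        cases ss with
        | nil => rfl
        | cons z zs => rfl
      | false =>
        cases rest with
        | nil =>
          have h1 : s0 = [] ∧ ss = ([] : List (List String)) := by
            have h0 : ([[]] : List (List String)) = s0 :: ss := hs
            exact ⟨((List.cons.injEq _ _ _ _).mp h0).1.symm, ((List.cons.injEq _ _ _ _).mp h0).2.symm⟩
          obtain ⟨h1, h2⟩ := h1
          subst h1; subst h2
          rw [pvGo_text_nil l hl']
          show [pvB_conv l] = pvB_process [[l]] false
          simp only [pvB_process, List.map]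
          rw [show pvB_breaks false [pvB_conv l]
              = [if pvB_cond (pvB_conv l) "" then pvB_conv l ++ "  " else pvB_conv l] from rfl]
          rw [show pvB_cond (pvB_conv l) "" = false from by unfold pvB_cond; simp]
          rfl
        | cons x rs =>
          rw [pvGo_text_cons l x rs hl', ih false, hs]
          by_cases hx : (x == "```") = true
          · -- next line is a fence: the text segment here is exactly [l]
            have hxeq : x = "```" := eq_of_beq hx
            subst hxeq
            have hs2 : pvB_split ("```" :: rs) = [] :: pvB_split rs := by
              simp [pvB_split]
            obtain ⟨t0, ts, ht⟩ : ∃ t0 ts, pvB_split rs = t0 :: ts := by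
              cases h : pvB_split rs with
              | nil => exact absurd h (pv_split_ne_nil rs)
              | cons a b => exact ⟨a, b, rfl⟩
            rw [hs2, ht] at hs
            have h1 : s0 = ([] : List String) := ((List.cons.injEq _ _ _ _).mp hs).1.symm
            have h2 : ss = t0 :: ts := ((List.cons.injEq _ _ _ _).mp hs).2.symm
            subst h1; subst h2
            show (if pvB_cond (pvB_conv l) "```" then pvB_conv l ++ "  " else pvB_conv l)
                :: pvB_process ([] :: t0 :: ts) false
              = pvB_process ([l] :: t0 :: ts) false
            simp [pvB_process, pvB_breaks]
          · -- next line is ordinary: it heads the same text segment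
            have hx' : (x == "```") = false := by simpa using hx
            obtain ⟨t0, ts, ht⟩ : ∃ t0 ts, pvB_split rs = t0 :: ts := by
              cases h : pvB_split rs with
              | nil => exact absurd h (pv_split_ne_nil rs)
              | cons a b => exact ⟨a, b, rfl⟩
            have hs2 : pvB_split (x :: rs) = (x :: t0) :: ts := by
              unfold pvB_split; rw [if_neg (by simp [hx']), ht]
            rw [hs2] at hs
            have h1 : s0 = x :: t0 := ((List.cons.injEq _ _ _ _).mp hs).1.symm
            have h2 : ss = ts := ((List.cons.injEq _ _ _ _).mp hs).2.symm
            subst h1; subst h2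
            rw [← pv_cond_conv]
            cases ss with
            | nil =>
              show (if pvB_cond (pvB_conv l) (pvB_conv x) then pvB_conv l ++ "  " else pvB_conv l)
                  :: pvB_process [x :: t0] false
                = pvB_process [l :: x :: t0] false
              simp [pvB_process, pvB_breaks]
            | cons z zs =>
              show (if pvB_cond (pvB_conv l) (pvB_conv x) then pvB_conv l ++ "  " else pvB_conv l)
                  :: pvB_process ((x :: t0) :: z :: zs) false
                = pvB_process ((l :: x :: t0) :: z :: zs) false
              simp [pvB_process, pvB_breaks]

theorem pv_dropWhile_comm (p : Char → Bool) : ∀ l : List Char,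
    List.dropWhile p (List.dropWhile p l.reverse).reverse
      = (List.dropWhile p (List.dropWhile p l).reverse).reverse := by
  intro l
  induction l with
  | nil => rfl
  | cons c t ih =>
    by_cases hc : p c = true
    · rw [show List.dropWhile p (c :: t) = List.dropWhile p t from by simp [hc]]
      rw [List.reverse_cons]
      by_cases hA : List.dropWhile p t.reverse = []
      · have hall : ∀ x ∈ t.reverse, p x = true := List.dropWhile_eq_nil_iff.mp hA
        have h1 : List.dropWhile p (t.reverse ++ [c]) = [] := by
          rw [List.dropWhile_append]; simp [hA, hc]
        have ht : List.dropWhile p t = [] :=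
          List.dropWhile_eq_nil_iff.mpr (fun x hx => hall x (by simp [hx]))
        rw [h1, ht]; rfl
      · have h1 : List.dropWhile p (t.reverse ++ [c]) = List.dropWhile p t.reverse ++ [c] := by
          rw [List.dropWhile_append]; simp [hA]
        rw [h1, List.reverse_append]
        simpa [List.dropWhile_cons, hc] using ih
    · rw [show List.dropWhile p (c :: t) = c :: t from by simp [hc]]
      rw [List.reverse_cons]
      by_cases hA : List.dropWhile p t.reverse = []
      · have h1 : List.dropWhile p (t.reverse ++ [c]) = [c] := by
          rw [List.dropWhile_append]; simp [hA, hc]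
        rw [h1]; simp [hc]
      · have h1 : List.dropWhile p (t.reverse ++ [c]) = List.dropWhile p t.reverse ++ [c] := by
          rw [List.dropWhile_append]; simp [hA]
        rw [h1, List.reverse_append]
        simp [hc]

-- .rstrip().lstrip() is .strip()
theorem pv_lstrip_rstrip (s : String) :
    PySem.Str.lstrip (PySem.Str.rstrip s) = PySem.Str.strip s := by
  unfold PySem.Str.lstrip PySem.Str.rstrip PySem.Str.strip
  rw [String.toList_ofList]
  unfold PySem.Chars.lstrip PySem.Chars.rstrip PySem.Chars.strip
  rw [pv_dropWhile_comm]; rfl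

-- ===== VERDICT (by name: the statement is the Claim_ definition above) =====
theorem ConvertFromZimWikiSyntax_spec : Claim_equal_ConvertFromZimWikiSyntax := by
  intro T _
  unfold Spec_ConvertFromZimWikiSyntax ConvertFromZimWikiSyntax ConvertFromZimWikiSyntax_alt
  simp only [List.foldl]
  rw [pv_merge, pv_seg, pv_lstrip_rstrip]
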